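-- pv_equiv track=rewrite | github.com/wooryjoon/algorithms | 백준/Gold/1744. 수 묶기/수 묶기.py | extractAns
-- ===== SOURCE A (Python) =====
-- def extractAns(i,arr):
--     ans = 0
--     while i >= 0 :
--         if i == 0 :
--             ans += arr[i]
--             break
--         if arr[i] * arr[i-1] >= arr[i] + arr[i-1]:
--             ans += arr[i] * arr[i-1]
--             i = i - 2
--         elif arr[i] * arr[i-1] < arr[i] + arr[i-1]:
--             ans += arr[i]
--             i = i - 1
--     return ans
-- ===== SOURCE B (Python) =====
-- def extractAns(i, arr):
--     # Bottom-up DP over the recurrence f(j) = best greedy value for arr[0..j]: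
--     # f(-1) = 0, f(0) = arr[0],
--     # f(j) = arr[j]*arr[j-1] + f(j-2) if that product >= the sum else arr[j] + f(j-1).
--     if i < 0:
--         return 0
--     prev2, prev1 = 0, arr[0]  # f(j-2), f(j-1) entering iteration j
--     for j in range(1, i + 1):
--         p = arr[j] * arr[j - 1]
--         s = arr[j] + arr[j - 1]
--         cur = p + prev2 if p >= s else arr[j] + prev1
--         prev2, prev1 = prev1, cur
--     return prev1
-- ===== Notes on version B (the rewrite author's own statement) =====
-- stated objective: alternative
-- what changed: Replaced A's right-to-left while-loop with a variable -1/-2 step and a running accumulator by a bottom-up dynamic program over the prefix recurrence f(j), computed left-to-right with two rolling variables.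
import Mathlib
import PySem

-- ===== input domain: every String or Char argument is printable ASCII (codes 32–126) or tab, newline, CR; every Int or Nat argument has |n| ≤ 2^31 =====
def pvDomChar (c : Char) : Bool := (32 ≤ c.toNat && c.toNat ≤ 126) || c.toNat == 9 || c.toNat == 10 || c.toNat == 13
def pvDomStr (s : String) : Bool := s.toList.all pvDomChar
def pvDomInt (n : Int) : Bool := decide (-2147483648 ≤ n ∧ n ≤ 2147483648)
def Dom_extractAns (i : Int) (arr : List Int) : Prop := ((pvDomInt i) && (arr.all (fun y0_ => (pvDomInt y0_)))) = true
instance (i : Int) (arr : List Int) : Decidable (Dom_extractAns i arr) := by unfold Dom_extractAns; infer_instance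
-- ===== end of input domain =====

-- B replaces A's right-to-left while-loop with variable step (-1/-2) by a bottom-up
-- dynamic program over the prefix recurrence (objective: alternative decomposition, same cost).

-- arr[j] for an index known in range (out-of-range reads are excluded by Pre_)
def pvGet (arr : List Int) (j : Int) : Int := (PySem.List.pyGet? arr j).getD 0

-- ===== PORT A =====
def extractAnsLoop (i : Int) (arr : List Int) (ans : Int) : Int :=
  if 0 ≤ i then
    if i = 0 then ans + pvGet arr i
    else if pvGet arr i * pvGet arr (i-1) ≥ pvGet arr i + pvGet arr (i-1) then
      extractAnsLoop (i-2) arr (ans + pvGet arr i * pvGet arr (i-1))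
    else  -- Python's elif condition is exactly the negation of the branch above
      extractAnsLoop (i-1) arr (ans + pvGet arr i)
  else ans
termination_by i.toNat
decreasing_by all_goals omega

def extractAns (i : Int) (arr : List Int) : Int := extractAnsLoop i arr 0

-- ===== PORT B =====
def extractAnsStep (arr : List Int) (st : Int × Int) (j : Int) : Int × Int :=
  let p := pvGet arr j * pvGet arr (j-1)
  let s := pvGet arr j + pvGet arr (j-1)
  let cur := if p ≥ s then p + st.1 else pvGet arr j + st.2
  (st.2, cur)

def extractAns_alt (i : Int) (arr : List Int) : Int :=
  if i < 0 then 0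
  else
    ((PySem.List.pyRange 1 (i+1) 1).foldl (extractAnsStep arr) (0, pvGet arr 0)).2

-- ===== PRECONDITION & SPEC =====
-- Pre_ excludes i ≥ len(arr): there A raises IndexError on arr[i] (as does B).
def Pre_extractAns (i : Int) (arr : List Int) : Prop := i < (arr.length : Int)
instance (i : Int) (arr : List Int) : Decidable (Pre_extractAns i arr) := by unfold Pre_extractAns; infer_instance
def pvWitness_extractAns : Int × List Int := (1, [3, 3])

def Spec_extractAns (i : Int) (arr : List Int) (out : Int) : Prop := out = extractAns_alt i arr
instance (i : Int) (arr : List Int) (out : Int) : Decidable (Spec_extractAns i arr out) := by unfold Spec_extractAns; infer_instance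

-- ===== CLAIM (what is proved, stated in full; the proofs are below) =====
def Claim_equal_extractAns : Prop := ∀ (i : Int) (arr : List Int), Dom_extractAns i arr → Pre_extractAns i arr → Spec_extractAns i arr (extractAns i arr)

-- ===== LEMMAS AND PROOFS =====

-- the common prefix recurrence both programs compute
def fRec (i : Int) (arr : List Int) : Int :=
  if i < 0 then 0
  else if i = 0 then pvGet arr 0
  else if pvGet arr i * pvGet arr (i-1) ≥ pvGet arr i + pvGet arr (i-1) then
    pvGet arr i * pvGet arr (i-1) + fRec (i-2) arr
  else pvGet arr i + fRec (i-1) arr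
termination_by i.toNat
decreasing_by all_goals omega

theorem fRec_neg (i : Int) (arr : List Int) (h : i < 0) : fRec i arr = 0 := by
  rw [fRec]; simp [h]

theorem loopA_eq_fRec (i : Int) (arr : List Int) (ans : Int) :
    extractAnsLoop i arr ans = ans + fRec i arr := by
  fun_induction extractAnsLoop i arr ans with
  | case1 ans h0 =>
    rw [fRec]; norm_num
  | case2 i ans h0 h1 hc ih =>
    rw [fRec]
    simp only [if_neg (by omega : ¬ i < 0), if_neg h1, if_pos hc]
    rw [ih]; ring
  | case3 i ans h0 h1 hc ih =>
    rw [fRec]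
    simp only [if_neg (by omega : ¬ i < 0), if_neg h1, if_neg hc]
    rw [ih]; ring
  | case4 i ans h0 =>
    rw [fRec_neg i arr (by omega)]; omega

theorem foldB_eq_fRec (arr : List Int) (n : Nat) :
    (PySem.List.pyRange 1 ((n : Int) + 1) 1).foldl (extractAnsStep arr) (0, pvGet arr 0)
      = (fRec ((n : Int) - 1) arr, fRec (n : Int) arr) := by
  induction n with
  | zero =>
    rw [PySem.List.pyRange_one_eq_nil (by norm_num)]
    simp [fRec_neg, fRec]
  | succ n ih =>
    have e1 : ((n + 1 : Nat) : Int) = (n : Int) + 1 := by push_cast; ring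
    rw [e1, PySem.List.pyRange_one_succ_right (by omega), List.foldl_append, ih]
    have e2 : (n : Int) + 1 - 1 = (n : Int) := by ring
    have e3 : (n : Int) + 1 - 2 = (n : Int) - 1 := by ring
    simp only [List.foldl, extractAnsStep, Prod.mk.injEq, e2]
    refine ⟨trivial, ?_⟩
    conv_rhs => rw [fRec]
    rw [if_neg (by omega : ¬ (n : Int) + 1 < 0),
        if_neg (by omega : ¬ (n : Int) + 1 = 0), e2, e3]

theorem alt_eq_fRec (i : Int) (arr : List Int) : extractAns_alt i arr = fRec i arr := by
  unfold extractAns_alt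
  split_ifs with h
  · rw [fRec_neg i arr h]
  · obtain ⟨n, rfl⟩ : ∃ n : Nat, i = (n : Int) := ⟨i.toNat, by omega⟩
    rw [foldB_eq_fRec]

-- ===== VERDICT (by name: the statement is the Claim_ definition above) =====
theorem extractAns_spec : Claim_equal_extractAns := by
  intro i arr _ _
  unfold Spec_extractAns extractAns
  rw [loopA_eq_fRec, alt_eq_fRec]; omega
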